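-- pv_equiv track=rewrite | github.com/SeongcheolJeong/Autonomy-E2E-Codebase | 30_Projects/P_E2E_Stack/prototype/run_ci_summary.py | _count_threshold_drift_hold_policy_failure_scope_reason_keys
-- ===== SOURCE A (Python) =====
-- def _extract_threshold_drift_hold_policy_failure_scope(value: object) -> str:
--     text = str(value).strip()
--     if not text:
--         return "unknown"
--     marker = " threshold drift hold policy failed"
--     lower_text = text.lower()
--     marker_idx = lower_text.find(marker)
--     if marker_idx <= 0:
--         return "unknown"
--     scope_text = text[:marker_idx].strip().lower()
--     if not scope_text:
--         return "unknown"
--     return scope_text.replace(" ", "_")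
--
-- def _extract_threshold_drift_hold_policy_failure_reason_keys(value: object) -> list[str]:
--     text = str(value).strip()
--     if "reason_keys=" not in text:
--         return []
--     tail = text.split("reason_keys=", 1)[1].strip()
--     if not tail or tail.lower() == "n/a":
--         return []
--     return [part.strip() for part in tail.split(",") if part.strip()]
--
-- def _count_threshold_drift_hold_policy_failure_scope_reason_keys(values: list[str]) -> dict[str, dict[str, int]]:
--     counts: dict[str, dict[str, int]] = {}
--     for raw in values:
--         scope_key = _extract_threshold_drift_hold_policy_failure_scope(raw)
--         reason_keys = _extract_threshold_drift_hold_policy_failure_reason_keys(raw)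
--         if not reason_keys:
--             continue
--         scope_reason_counts = counts.setdefault(scope_key, {})
--         for reason_key in reason_keys:
--             scope_reason_counts[reason_key] = scope_reason_counts.get(reason_key, 0) + 1
--     return counts
-- ===== SOURCE B (Python) =====
-- def _extract_threshold_drift_hold_policy_failure_scope(value: object) -> str:
--     text = str(value).strip()
--     if not text:
--         return "unknown"
--     marker = " threshold drift hold policy failed"
--     lower_text = text.lower()
--     marker_idx = lower_text.find(marker)
--     if marker_idx <= 0:
--         return "unknown"
--     scope_text = text[:marker_idx].strip().lower()
--     if not scope_text:
--         return "unknown"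
--     return scope_text.replace(" ", "_")
--
-- def _extract_threshold_drift_hold_policy_failure_reason_keys(value: object) -> list[str]:
--     text = str(value).strip()
--     if "reason_keys=" not in text:
--         return []
--     tail = text.split("reason_keys=", 1)[1].strip()
--     if not tail or tail.lower() == "n/a":
--         return []
--     return [part.strip() for part in tail.split(",") if part.strip()]
--
-- def _count_threshold_drift_hold_policy_failure_scope_reason_keys(values: list[str]) -> dict[str, dict[str, int]]:
--     # Group-by strategy: parse each line once, then build the result scope by scope
--     # (first-appearance order); each scope's reason counts come from rescanning its
--     # group and using list.count, with no incremental counter mutation at all.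
--     entries = [(_extract_threshold_drift_hold_policy_failure_scope(raw),
--                 _extract_threshold_drift_hold_policy_failure_reason_keys(raw))
--                for raw in values]
--     entries = [(scope, reasons) for scope, reasons in entries if reasons]
--     result: dict[str, dict[str, int]] = {}
--     for scope, _ in entries:
--         if scope not in result:
--             group = [r for s, reasons in entries if s == scope for r in reasons]
--             result[scope] = {key: group.count(key) for key in dict.fromkeys(group)}
--     return result
-- ===== Notes on version B (the rewrite author's own statement) =====
-- stated objective: alternative
-- what changed: A builds the nested counts incrementally in one interleaved loop (setdefault + per-reason dict increments); B instead parses all lines into (scope, reason_keys) entries, then builds the result group-by-scope: for each first-seen scope it rescans the entries to collect that scope's reasons and writes the whole inner dict at once as {key: group.count(key) for key in dict.fromkeys(group)} - no incremental counters at all.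
import Mathlib
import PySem

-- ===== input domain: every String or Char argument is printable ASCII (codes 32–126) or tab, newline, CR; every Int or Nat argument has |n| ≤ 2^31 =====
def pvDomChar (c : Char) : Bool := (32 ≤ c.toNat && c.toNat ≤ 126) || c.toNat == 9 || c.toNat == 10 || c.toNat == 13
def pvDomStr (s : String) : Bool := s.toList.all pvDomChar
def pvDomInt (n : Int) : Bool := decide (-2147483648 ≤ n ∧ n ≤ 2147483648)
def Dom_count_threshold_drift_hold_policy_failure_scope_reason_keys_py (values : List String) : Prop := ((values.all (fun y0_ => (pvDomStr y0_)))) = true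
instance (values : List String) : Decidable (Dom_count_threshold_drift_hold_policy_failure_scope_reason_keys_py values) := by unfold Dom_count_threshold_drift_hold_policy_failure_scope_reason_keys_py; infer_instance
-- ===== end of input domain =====

-- B replaces A's single incremental-counting loop by a group-by-scope strategy: parse all lines
-- into entries, then for each first-seen scope rescan the entries and write the whole inner count
-- dict at once via list.count — same result, objective: alternative algorithm (not faster).

-- ===== PORT A =====
-- shared parse helpers (identical in Source A and Source B)
def pvScope (value : String) : String :=
  let text := PySem.Str.strip value
  if PySem.Str.len text = 0 then "unknown"
  else
    let marker := " threshold drift hold policy failed"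
    let lower_text := PySem.Str.lower text
    let marker_idx := PySem.Str.find lower_text marker
    if marker_idx ≤ 0 then "unknown"
    else
      let scope_text := PySem.Str.lower (PySem.Str.strip (PySem.Str.slice text none (some marker_idx)))
      if PySem.Str.len scope_text = 0 then "unknown"
      else PySem.Str.replace scope_text " " "_"

def pvReasonKeys (value : String) : List String :=
  let text := PySem.Str.strip value
  if PySem.Str.isIn "reason_keys=" text = false then []
  else
    -- text.split("reason_keys=", 1)[1]: the separator occurs in text, so the split always has a
    -- second part; the `[]` fallback is an unreachable totality guard
    match (PySem.Str.splitMax? text "reason_keys=" 1).getD [] with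
    | _ :: t :: _ =>
      let tail := PySem.Str.strip t
      if PySem.Str.len tail = 0 then []
      else if PySem.Str.lower tail = "n/a" then []
      else (((PySem.Str.split? tail ",").getD []).filter
              (fun part => !(PySem.Str.len (PySem.Str.strip part) = 0))).map PySem.Str.strip
    | _ => []

-- one iteration of A's `for raw in values` loop
def pvStepA (counts : PySem.Dict String (PySem.Dict String Int)) (raw : String) :
    PySem.Dict String (PySem.Dict String Int) :=
  let scope_key := pvScope raw
  let reason_keys := pvReasonKeys raw
  if reason_keys.isEmpty then counts
  else
    -- scope_reason_counts aliases counts[scope_key]: each inner assignment is a modify of counts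
    let counts1 := counts.setdefault scope_key PySem.Dict.empty
    reason_keys.foldl
      (fun c reason_key =>
        c.modify scope_key PySem.Dict.empty
          (fun inner => inner.insert reason_key (inner.getD reason_key 0 + 1)))
      counts1

def count_threshold_drift_hold_policy_failure_scope_reason_keys_py (values : List String) : List (String × List (String × Int)) :=
  ((values.foldl pvStepA PySem.Dict.empty).items).map (fun q => (q.1, q.2.items))

-- ===== PORT B =====
-- Source B: `group = [r for s, reasons in entries if s == scope for r in reasons]` and
-- `{key: group.count(key) for key in dict.fromkeys(group)}` — the whole inner dict of one scope
def pvGroupCounts (entries : List (String × List String)) (scope : String) :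
    PySem.Dict String Int :=
  let group := (entries.filter (fun q => q.1 == scope)).flatMap (fun q => q.2)
  (PySem.List.dedup group).foldl
    (fun d key => d.insert key (PySem.List.count group key : Int)) PySem.Dict.empty

def count_threshold_drift_hold_policy_failure_scope_reason_keys_py_alt (values : List String) : List (String × List (String × Int)) :=
  -- stage 1: parse every line once, keep entries with reason keys
  let entries := (values.map (fun raw => (pvScope raw, pvReasonKeys raw))).filter
    (fun p => !p.2.isEmpty)
  -- stage 2: group by scope in first-appearance order
  let result := entries.foldl
    (fun res p =>
      if res.contains p.1 then res
      else res.insert p.1 (pvGroupCounts entries p.1))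
    PySem.Dict.empty
  result.items.map (fun q => (q.1, q.2.items))

-- ===== PRECONDITION & SPEC =====
def Spec_count_threshold_drift_hold_policy_failure_scope_reason_keys_py (values : List String) (out : List (String × List (String × Int))) : Prop := out = count_threshold_drift_hold_policy_failure_scope_reason_keys_py_alt values
instance (values : List String) (out : List (String × List (String × Int))) : Decidable (Spec_count_threshold_drift_hold_policy_failure_scope_reason_keys_py values out) := by unfold Spec_count_threshold_drift_hold_policy_failure_scope_reason_keys_py; infer_instance

-- ===== CLAIM (what is proved, stated in full; the proofs are below) =====
def Claim_equal_count_threshold_drift_hold_policy_failure_scope_reason_keys_py : Prop := ∀ (values : List String), Dom_count_threshold_drift_hold_policy_failure_scope_reason_keys_py values → Spec_count_threshold_drift_hold_policy_failure_scope_reason_keys_py values (count_threshold_drift_hold_policy_failure_scope_reason_keys_py values)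

-- ===== LEMMAS AND PROOFS =====

-- the (scope, reason) pairs contributed by one raw entry
def pvPairsOf (raw : String) : List (String × String) :=
  (pvReasonKeys raw).map (fun r => (pvScope raw, r))

-- one nested-count step on a single (scope, reason) pair
def pvStepM (c : PySem.Dict String (PySem.Dict String Int)) (p : String × String) :
    PySem.Dict String (PySem.Dict String Int) :=
  c.modify p.1 PySem.Dict.empty (fun inner => inner.insert p.2 (inner.getD p.2 0 + 1))

-- the parsed entries B works on
def pvEntries (values : List String) : List (String × List String) :=
  (values.map (fun raw => (pvScope raw, pvReasonKeys raw))).filter (fun p => !p.2.isEmpty)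

-- all reasons of one scope, in entry order
def pvGroup (entries : List (String × List String)) (s : String) : List String :=
  (entries.filter (fun q => q.1 == s)).flatMap (fun q => q.2)

-- setdefault-then-modify at the same key collapses to a bare modify
theorem pv_setdefault_modify (c : PySem.Dict String (PySem.Dict String Int)) (k : String)
    (f : PySem.Dict String Int → PySem.Dict String Int) :
    (c.setdefault k PySem.Dict.empty).modify k PySem.Dict.empty f =
      c.modify k PySem.Dict.empty f := by
  by_cases h : c.contains k = true
  · rw [PySem.Dict.setdefault_of_contains _ _ h]
  · have h' : c.contains k = false := by simpa using h
    rw [PySem.Dict.setdefault_of_not_contains _ _ h']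
    simp only [PySem.Dict.modify]
    rw [PySem.Dict.getD_eq_get?_getD, PySem.Dict.get?_insert_self]
    rw [PySem.Dict.getD_of_not_contains _ _ h']
    simp only [Option.getD_some]
    exact PySem.Dict.insert_insert_self c k PySem.Dict.empty (f PySem.Dict.empty)

-- one iteration of A's loop is the pair-by-pair nested-count fold over its pairs
theorem pvStepA_eq_pairs_fold (c : PySem.Dict String (PySem.Dict String Int)) (raw : String) :
    pvStepA c raw = (pvPairsOf raw).foldl pvStepM c := by
  unfold pvStepA pvPairsOf
  cases hrk : pvReasonKeys raw with
  | nil => simp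
  | cons r rest =>
    simp only [List.isEmpty_cons, Bool.false_eq_true, if_false, List.map_cons, List.foldl_cons,
      List.foldl_map, pvStepM]
    rw [pv_setdefault_modify]

-- A's whole loop is the nested-count fold over the flat pair list
theorem pv_foldA_eq (values : List String) (c : PySem.Dict String (PySem.Dict String Int)) :
    values.foldl pvStepA c = (values.flatMap pvPairsOf).foldl pvStepM c := by
  induction values generalizing c with
  | nil => rfl
  | cons raw rest ih =>
    simp only [List.flatMap_cons, List.foldl_append, List.foldl_cons, pvStepA_eq_pairs_fold, ih]

-- the flat pair list is the entries blown up pairwise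
theorem pv_pairs_eq_entries (values : List String) :
    values.flatMap pvPairsOf =
      (pvEntries values).flatMap (fun e => e.2.map (fun r => (e.1, r))) := by
  unfold pvEntries
  induction values with
  | nil => rfl
  | cons raw rest ih =>
    cases hrk : (pvReasonKeys raw).isEmpty with
    | true =>
      have h0 : pvReasonKeys raw = [] := by simpa using hrk
      simp only [List.flatMap_cons, List.map_cons, List.filter_cons, pvPairsOf, h0,
        List.isEmpty_nil, Bool.not_true, Bool.false_eq_true, if_false, List.map_nil,
        List.nil_append, ih]
    | false =>
      simp only [List.flatMap_cons, List.map_cons, List.filter_cons, hrk, Bool.not_false,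
        if_true, List.flatMap_cons, pvPairsOf, ih]

-- reading a scope's getD through the pair fold: it is the inner counting fold over that
-- scope's reasons
theorem pv_getD_foldM (pairs : List (String × String))
    (d : PySem.Dict String (PySem.Dict String Int)) (s : String) :
    (pairs.foldl pvStepM d).getD s PySem.Dict.empty =
      ((pairs.filter (fun p => p.1 == s)).map (fun p => p.2)).foldl
        (fun inn r => inn.insert r (inn.getD r 0 + 1)) (d.getD s PySem.Dict.empty) := by
  induction pairs generalizing d with
  | nil => rfl
  | cons p rest ih =>
    simp only [List.foldl_cons, List.filter_cons]
    by_cases hp : p.1 = s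
    · have hbe : (p.1 == s) = true := by simpa using hp
      simp only [hbe, if_true, List.map_cons, List.foldl_cons, ih]
      have : (pvStepM d p).getD s PySem.Dict.empty =
          (d.getD s PySem.Dict.empty).insert p.2
            ((d.getD s PySem.Dict.empty).getD p.2 0 + 1) := by
        unfold pvStepM
        rw [hp, PySem.Dict.getD_modify, if_pos rfl]
      rw [this]
    · have hbe : (p.1 == s) = false := by simpa using hp
      simp only [hbe, Bool.false_eq_true, if_false, ih]
      have : (pvStepM d p).getD s PySem.Dict.empty = d.getD s PySem.Dict.empty := by
        unfold pvStepM
        rw [PySem.Dict.getD_modify, if_neg (Ne.symm hp)]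
      rw [this]

-- keys of the pair fold
theorem pv_keys_foldM (pairs : List (String × String))
    (d : PySem.Dict String (PySem.Dict String Int)) :
    (pairs.foldl pvStepM d).keys = PySem.Set.update d.keys (pairs.map (fun p => p.1)) := by
  exact PySem.Dict.keys_foldl_modify_key pairs (fun p => p.1) PySem.Dict.empty
    (fun _ p => fun inner => inner.insert p.2 (inner.getD p.2 0 + 1)) d

-- keys of B's group-by fold
theorem pv_keys_foldB (entries : List (String × List String))
    (g : String → PySem.Dict String Int) (d : PySem.Dict String (PySem.Dict String Int)) :
    (entries.foldl
        (fun res p => if res.contains p.1 then res else res.insert p.1 (g p.1)) d).keys =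
      PySem.Set.update d.keys (entries.map (fun p => p.1)) := by
  induction entries generalizing d with
  | nil => rfl
  | cons p rest ih =>
    simp only [List.foldl_cons, List.map_cons, PySem.Set.update_cons]
    by_cases h : d.contains p.1 = true
    · have hmem : p.1 ∈ d.keys := (PySem.Dict.contains_iff_mem_keys d p.1).1 h
      simp only [h, if_true]
      rw [ih, PySem.Set.add_of_mem hmem]
    · have h' : d.contains p.1 = false := by simpa using h
      have hnot : p.1 ∉ d.keys := fun hm => by
        simp [(PySem.Dict.contains_iff_mem_keys d p.1).2 hm] at h'
      simp only [h', Bool.false_eq_true, if_false]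
      rw [ih, PySem.Dict.keys_insert_of_not_contains _ _ h', PySem.Set.add_of_not_mem hnot]

-- once a key holds its group dict, B's fold never touches it again
theorem pv_foldB_preserve (entries : List (String × List String))
    (g : String → PySem.Dict String Int) (s : String) :
    ∀ d : PySem.Dict String (PySem.Dict String Int), d.get? s = some (g s) →
    (entries.foldl
        (fun res p => if res.contains p.1 then res else res.insert p.1 (g p.1)) d).get? s =
      some (g s) := by
  induction entries with
  | nil => intro d h; exact h
  | cons p rest ih =>
    intro d h
    simp only [List.foldl_cons]
    by_cases hc : d.contains p.1 = true
    · simp only [hc, if_true]; exact ih d h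
    · have hc' : d.contains p.1 = false := by simpa using hc
      simp only [hc', Bool.false_eq_true, if_false]
      apply ih
      have hne : s ≠ p.1 := by
        intro he
        have : d.contains p.1 = true := by
          rw [← he, PySem.Dict.contains_eq_isSome_get?, h]; rfl
        simp [hc'] at this
      rw [PySem.Dict.get?_insert_of_ne _ _ hne]; exact h

-- every first-seen scope receives its group dict
theorem pv_foldB_get (entries : List (String × List String))
    (g : String → PySem.Dict String Int) (s : String) :
    ∀ d : PySem.Dict String (PySem.Dict String Int),
    s ∈ entries.map (fun p => p.1) → d.contains s = false →
    (entries.foldl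
        (fun res p => if res.contains p.1 then res else res.insert p.1 (g p.1)) d).get? s =
      some (g s) := by
  induction entries with
  | nil => intro d hs _; simp at hs
  | cons p rest ih =>
    intro d hs hd
    simp only [List.foldl_cons]
    by_cases hps : p.1 = s
    · subst hps
      simp only [hd, Bool.false_eq_true, if_false]
      exact pv_foldB_preserve rest g p.1 _ (by rw [PySem.Dict.get?_insert_self])
    · have hs' : s ∈ rest.map (fun p => p.1) := by
        simp only [List.map_cons, List.mem_cons] at hs
        exact hs.resolve_left (fun he => hps he.symm)
      by_cases hc : d.contains p.1 = true
      · simp only [hc, if_true]; exact ih d hs' hd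
      · have hc' : d.contains p.1 = false := by simpa using hc
        simp only [hc', Bool.false_eq_true, if_false]
        apply ih _ hs'
        rw [PySem.Dict.contains_insert, hd]
        simp only [Bool.or_false, beq_eq_false_iff_ne, ne_eq]
        exact fun he => hps he.symm

-- B's comprehension dict for one scope IS the counter of that scope's reasons
theorem pv_groupCounts_eq_counter (entries : List (String × List String)) (s : String) :
    pvGroupCounts entries s = PySem.Dict.counter (pvGroup entries s) := by
  unfold pvGroupCounts pvGroup
  apply PySem.Dict.ext
  rw [PySem.Dict.items_counter]
  rw [show (PySem.List.dedup ((entries.filter (fun q => q.1 == s)).flatMap (fun q => q.2))).foldl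
        (fun d key => d.insert key
          (PySem.List.count ((entries.filter (fun q => q.1 == s)).flatMap (fun q => q.2)) key : Int))
        PySem.Dict.empty =
      (PySem.List.dedup ((entries.filter (fun q => q.1 == s)).flatMap (fun q => q.2))).foldl
        (fun d key => d.insert (id key)
          ((fun k => (PySem.List.count ((entries.filter (fun q => q.1 == s)).flatMap (fun q => q.2)) k : Int)) key))
        PySem.Dict.empty from rfl]
  rw [PySem.Dict.items_foldl_insert_fresh _ id _ _
    (by intro a _; exact PySem.Dict.contains_empty a)
    (by simp [PySem.List.dedup_eq_ofList, PySem.Set.nodup_ofList])]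
  simp [PySem.List.dedup_eq_ofList, PySem.List.count, PySem.Dict.empty]

-- blowing entries up and filtering one scope yields exactly that scope's group
theorem pv_filter_blowup (entries : List (String × List String)) (s : String) :
    (((entries.flatMap (fun e => e.2.map (fun r => (e.1, r)))).filter
        (fun p => p.1 == s)).map (fun p => p.2)) = pvGroup entries s := by
  unfold pvGroup
  induction entries with
  | nil => rfl
  | cons e rest ih =>
    simp only [List.flatMap_cons, List.filter_append, List.map_append, List.filter_cons, ih]
    cases he : e.1 == s with
    | true =>
      simp only [if_true, List.flatMap_cons]
      congr 1
      rw [List.filter_map, List.map_map]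
      have : ((fun p : String × String => p.1 == s) ∘ fun r => (e.1, r)) = fun _ => true := by
        funext r; simp [he]
      rw [this, List.filter_true]
      simp
    | false =>
      simp only [Bool.false_eq_true, if_false]
      rw [List.filter_map]
      have : ((fun p : String × String => p.1 == s) ∘ fun r => (e.1, r)) = fun _ => false := by
        funext r; simp [he]
      rw [this, List.filter_false]
      simp

-- updating with a nonempty constant block is a single add
theorem pv_update_const (l : List String) (s : PySem.Set String) (k : String) (hl : l ≠ []) :
    PySem.Set.update s (l.map (fun _ => k)) = PySem.Set.add s k := by
  induction l generalizing s with
  | nil => exact absurd rfl hl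
  | cons x xs ih =>
    simp only [List.map_cons, PySem.Set.update_cons]
    cases xs with
    | nil => rfl
    | cons y ys =>
      rw [ih (PySem.Set.add s k) (by simp)]
      exact PySem.Set.add_of_mem ((PySem.Set.mem_add _ _ _).2 (Or.inr rfl))

-- scope keys of the blown-up pairs dedup to the scope keys of the entries
theorem pv_update_blowup (entries : List (String × List String)) (s0 : PySem.Set String)
    (hne : ∀ e ∈ entries, e.2 ≠ []) :
    PySem.Set.update s0 ((entries.flatMap (fun e => e.2.map (fun r => (e.1, r)))).map
        (fun p => p.1)) =
      PySem.Set.update s0 (entries.map (fun p => p.1)) := by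
  induction entries generalizing s0 with
  | nil => rfl
  | cons e rest ih =>
    simp only [List.flatMap_cons, List.map_append, List.map_cons, PySem.Set.update_append,
      PySem.Set.update_cons, List.map_map]
    rw [show ((fun p : String × String => p.1) ∘ fun r => (e.1, r)) = fun _ => e.1 from rfl]
    rw [pv_update_const _ _ _ (hne e (by simp))]
    exact ih _ (fun e' he' => hne e' (by simp [he']))

-- every entry B keeps has reason keys
theorem pv_entries_ne (values : List String) :
    ∀ e ∈ pvEntries values, e.2 ≠ [] := by
  intro e he
  unfold pvEntries at he
  have := (List.mem_filter.1 he).2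
  simpa using this

-- ===== VERDICT (by name: the statement is the Claim_ definition above) =====
theorem count_threshold_drift_hold_policy_failure_scope_reason_keys_py_spec : Claim_equal_count_threshold_drift_hold_policy_failure_scope_reason_keys_py := by
  intro values _
  unfold Spec_count_threshold_drift_hold_policy_failure_scope_reason_keys_py
  unfold count_threshold_drift_hold_policy_failure_scope_reason_keys_py
  unfold count_threshold_drift_hold_policy_failure_scope_reason_keys_py_alt
  have hpairs := pv_pairs_eq_entries values
  set entries := pvEntries values with hentdef
  have hblow : values.flatMap pvPairsOf =
      entries.flatMap (fun e => e.2.map (fun r => (e.1, r))) := hpairs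
  -- the two outer dicts
  set DA := values.foldl pvStepA PySem.Dict.empty with hDA
  set DB := entries.foldl
    (fun res p => if res.contains p.1 then res else res.insert p.1 (pvGroupCounts entries p.1))
    PySem.Dict.empty with hDB
  -- keys agree
  have hkA : DA.keys = PySem.Set.ofList (entries.map (fun p => p.1)) := by
    rw [hDA, pv_foldA_eq, pv_keys_foldM, hblow]
    rw [show (PySem.Dict.empty : PySem.Dict String (PySem.Dict String Int)).keys = [] from rfl]
    rw [pv_update_blowup entries [] (pv_entries_ne values), PySem.Set.update_nil_left]
  have hkB : DB.keys = PySem.Set.ofList (entries.map (fun p => p.1)) := by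
    rw [hDB, pv_keys_foldB]
    rw [show (PySem.Dict.empty : PySem.Dict String (PySem.Dict String Int)).keys = [] from rfl]
    rw [PySem.Set.update_nil_left]
  have hnodup : (PySem.Set.ofList (entries.map (fun p => p.1))).Nodup :=
    PySem.Set.nodup_ofList _
  -- values agree at every key
  have hval : ∀ s ∈ entries.map (fun p => p.1),
      DA.getD s PySem.Dict.empty = DB.getD s PySem.Dict.empty := by
    intro s hs
    have hA : DA.getD s PySem.Dict.empty = PySem.Dict.counter (pvGroup entries s) := by
      rw [hDA, pv_foldA_eq, pv_getD_foldM, hblow]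
      rw [show (PySem.Dict.empty : PySem.Dict String (PySem.Dict String Int)).getD s
            PySem.Dict.empty = PySem.Dict.empty from rfl]
      rw [PySem.Dict.foldl_insert_getD_add_one_eq_counter, pv_filter_blowup]
    have hB : DB.getD s PySem.Dict.empty = PySem.Dict.counter (pvGroup entries s) := by
      rw [hDB, PySem.Dict.getD_eq_get?_getD,
        pv_foldB_get entries (pvGroupCounts entries) s PySem.Dict.empty hs
          (PySem.Dict.contains_empty s)]
      rw [pv_groupCounts_eq_counter]; rfl
    rw [hA, hB]
  -- items agree, hence the outputs agree
  have hitems : DA.items = DB.items := by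
    rw [PySem.Dict.items_eq_map_keys DA (by rw [hkA]; exact hnodup) PySem.Dict.empty,
      PySem.Dict.items_eq_map_keys DB (by rw [hkB]; exact hnodup) PySem.Dict.empty,
      hkA, hkB]
    apply List.map_congr_left
    intro s hsmem
    have hs : s ∈ entries.map (fun p => p.1) := (PySem.Set.mem_ofList _ _).1 hsmem
    rw [hval s hs]
  rw [hitems]
  rfl
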